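-- pv_equiv track=rewrite | github.com/Surfer12/Farmer | scripts/python/invisible_fin_imu_analysis.py | _analyze_correction_distribution
-- ===== SOURCE A (Python) =====
-- from typing import List, Dict, Tuple, Optional
--
-- def _analyze_correction_distribution(corrections: List[Dict]) -> Dict:
--     """Analyze the distribution of corrections by axis"""
--     if not corrections:
--         return {'roll': 0, 'pitch': 0, 'yaw': 0}
--
--     axes = [c['axis'] for c in corrections]
--     distribution = {
--         'roll': axes.count('roll'),
--         'pitch': axes.count('pitch'),
--         'yaw': axes.count('yaw')
--     }
--
--     return distribution
-- ===== SOURCE B (Python) =====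
-- from typing import List, Dict
--
-- def _rle(xs):
--     """Run-length encode a list: consecutive equal elements become one (value, length) pair."""
--     runs = []
--     i = 0
--     n = len(xs)
--     while i < n:
--         j = i + 1
--         while j < n and xs[j] == xs[i]:
--             j += 1
--         runs.append((xs[i], j - i))
--         i = j
--     return runs
--
-- def _run_len(runs, v):
--     for a, n in runs:
--         if a == v:
--             return n
--     return 0
--
-- def _analyze_correction_distribution(corrections: List[Dict]) -> Dict:
--     """Sort the axis values, run-length encode the sorted list, read the counts off the runs."""
--     axes = sorted(c['axis'] for c in corrections)
--     runs = _rle(axes)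
--     return {'roll': _run_len(runs, 'roll'),
--             'pitch': _run_len(runs, 'pitch'),
--             'yaw': _run_len(runs, 'yaw')}
-- ===== Notes on version B (the rewrite author's own statement) =====
-- stated objective: alternative
-- what changed: B sorts the axis values, run-length encodes the sorted list into (value, run-length) pairs, and reads the three counts off the runs, instead of A's three separate list.count scans over the raw axes list.
import Mathlib
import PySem

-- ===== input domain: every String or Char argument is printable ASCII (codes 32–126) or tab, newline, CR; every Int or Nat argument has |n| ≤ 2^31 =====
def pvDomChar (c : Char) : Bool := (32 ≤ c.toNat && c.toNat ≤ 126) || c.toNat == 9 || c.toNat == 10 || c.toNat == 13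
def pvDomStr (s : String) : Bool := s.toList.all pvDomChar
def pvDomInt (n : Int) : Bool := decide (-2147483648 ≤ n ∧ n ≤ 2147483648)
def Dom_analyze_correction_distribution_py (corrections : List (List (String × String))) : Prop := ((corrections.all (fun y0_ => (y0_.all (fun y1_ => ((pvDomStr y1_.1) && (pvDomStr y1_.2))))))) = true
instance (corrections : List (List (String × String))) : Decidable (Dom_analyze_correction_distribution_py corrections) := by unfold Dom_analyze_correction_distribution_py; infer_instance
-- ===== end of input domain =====

-- B sorts the axis values, run-length encodes the sorted list, and reads the three counts off the runs (A scans the raw axes list with .count three times).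


-- ===== PORT A =====
-- c['axis'] : first-match lookup in the association list; Pre_ guarantees the key exists, the "" default is never reached inside Pre_.
def axisA (c : List (String × String)) : String :=
  ((PySem.Dict.mk c).get? "axis").getD ""

def analyze_correction_distribution_py (corrections : List (List (String × String))) : List (String × Int) :=
  if corrections = [] then [("roll", 0), ("pitch", 0), ("yaw", 0)]
  else
    let axes := corrections.map axisA
    [("roll", (axes.count "roll" : Int)),
     ("pitch", (axes.count "pitch" : Int)),
     ("yaw", (axes.count "yaw" : Int))]

-- ===== PORT B =====
def axisB (c : List (String × String)) : String :=
  ((PySem.Dict.mk c).get? "axis").getD ""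

-- _rle: the outer while loop consumes one maximal run of equal elements per iteration
-- and appends one (value, length) pair; here that is the obvious structural recursion
-- (inner 'while xs[j]==xs[i]' scan = takeWhile/dropWhile on the tail).
def rleB (xs : List String) : List (String × Int) :=
  match xs with
  | [] => []
  | x :: t =>
      (x, 1 + ((t.takeWhile (fun y => y == x)).length : Int)) ::
        rleB (t.dropWhile (fun y => y == x))
termination_by xs.length
decreasing_by
  simpa using Nat.lt_succ_of_le (t.length_dropWhile_le (fun y => y == x))

-- _run_len: first-match scan over the run list, default 0.
def runLenB (runs : List (String × Int)) (v : String) : Int :=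
  match runs with
  | [] => 0
  | (a, n) :: t => if a == v then n else runLenB t v

def analyze_correction_distribution_py_alt (corrections : List (List (String × String))) : List (String × Int) :=
  let axes := PySem.List.sorted (corrections.map axisB) (fun s => s) false
  let runs := rleB axes
  [("roll", runLenB runs "roll"),
   ("pitch", runLenB runs "pitch"),
   ("yaw", runLenB runs "yaw")]

-- ===== PRECONDITION & SPEC =====
-- Pre_ excludes exactly the inputs where some correction lacks the 'axis' key: there Python A (and B) raises KeyError.
def Pre_analyze_correction_distribution_py (corrections : List (List (String × String))) : Prop :=
  ∀ c ∈ corrections, "axis" ∈ c.map Prod.fst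
instance (corrections : List (List (String × String))) : Decidable (Pre_analyze_correction_distribution_py corrections) := by unfold Pre_analyze_correction_distribution_py; infer_instance

def pvWitness_analyze_correction_distribution_py : (List (List (String × String))) :=
  [[("axis", "roll")], [("axis", "up")], [("axis", "yaw")]]

def Spec_analyze_correction_distribution_py (corrections : List (List (String × String))) (out : List (String × Int)) : Prop := out = analyze_correction_distribution_py_alt corrections
instance (corrections : List (List (String × String))) (out : List (String × Int)) : Decidable (Spec_analyze_correction_distribution_py corrections out) := by unfold Spec_analyze_correction_distribution_py; infer_instance

-- ===== CLAIM (what is proved, stated in full; the proofs are below) =====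
def Claim_equal_analyze_correction_distribution_py : Prop := ∀ (corrections : List (List (String × String))), Dom_analyze_correction_distribution_py corrections → Pre_analyze_correction_distribution_py corrections → Spec_analyze_correction_distribution_py corrections (analyze_correction_distribution_py corrections)

-- ===== LEMMAS AND PROOFS =====

-- In a (<=)-sorted list, run-length lookup in the RLE equals the count of the value.
lemma rle_runLen (l : List String) (h : l.Pairwise (· ≤ ·)) (v : String) :
    runLenB (rleB l) v = (l.count v : Int) := by
  induction l using rleB.induct with
  | case1 => simp only [rleB, runLenB, List.count_nil, Nat.cast_zero]
  | case2 x t ih =>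
    have hx : ∀ y ∈ t, x ≤ y := (List.pairwise_cons.mp h).1
    have ht : t.Pairwise (· ≤ ·) := (List.pairwise_cons.mp h).2
    have hdrop : (t.dropWhile (fun y => y == x)).Pairwise (· ≤ ·) :=
      ht.sublist (t.dropWhile_sublist _)
    have hsplit : t.takeWhile (fun y => y == x) ++ t.dropWhile (fun y => y == x) = t :=
      t.takeWhile_append_dropWhile
    rw [rleB]
    by_cases hv : x = v
    · subst hv
      have hrun : (t.takeWhile (fun y => y == x)).count x
          = (t.takeWhile (fun y => y == x)).length := by
        apply List.count_eq_length.mpr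
        intro b hb
        have hbx : (b == x) = true := by simpa using List.mem_takeWhile_imp hb
        exact (eq_of_beq hbx).symm
      have hnot : x ∉ t.dropWhile (fun y => y == x) := by
        intro hmem
        cases hd : t.dropWhile (fun y => y == x) with
        | nil =>
          rw [hd] at hmem
          exact List.not_mem_nil hmem
        | cons d rest =>
          have hdne : (d == x) = false := by
            have h0 := List.head?_dropWhile_not (fun y => y == x) t
            rw [hd] at h0
            simpa using h0
          have hdx : d ≠ x := by simpa using hdne
          have hdt : d ∈ t := (t.dropWhile_sublist _).subset (by rw [hd]; exact List.mem_cons_self)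
          have hxd : x ≤ d := hx d hdt
          rw [hd] at hmem
          rcases List.mem_cons.mp hmem with h1 | h2
          · exact hdx h1.symm
          · have hdle : d ≤ x := (List.pairwise_cons.mp (hd ▸ hdrop)).1 x h2
            exact hdx (le_antisymm hdle hxd)
      have hcdrop : (t.dropWhile (fun y => y == x)).count x = 0 :=
        List.count_eq_zero.mpr hnot
      have hct : t.count x = (t.takeWhile (fun y => y == x)).length := by
        conv_lhs => rw [← hsplit]
        rw [List.count_append, hrun, hcdrop]
        omega
      have hstep : runLenB ((x, 1 + ((t.takeWhile (fun y => y == x)).length : Int)) ::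
          rleB (t.dropWhile (fun y => y == x))) x
          = 1 + ((t.takeWhile (fun y => y == x)).length : Int) := by
        simp [runLenB]
      rw [hstep, List.count_cons_self, hct]
      push_cast
      ring
    · have hne : ¬ (x == v) = true := by simpa using hv
      have hcrun : (t.takeWhile (fun y => y == x)).count v = 0 := by
        apply List.count_eq_zero.mpr
        intro hmem
        have hbx : (v == x) = true := by simpa using List.mem_takeWhile_imp hmem
        exact hv (eq_of_beq hbx).symm
      have hct : t.count v = (t.dropWhile (fun y => y == x)).count v := by
        conv_lhs => rw [← hsplit]
        rw [List.count_append, hcrun]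
        ring
      have hstep : runLenB ((x, 1 + ((t.takeWhile (fun y => y == x)).length : Int)) ::
          rleB (t.dropWhile (fun y => y == x))) v
          = runLenB (rleB (t.dropWhile (fun y => y == x))) v := by
        simp [runLenB, hne]
      rw [hstep, ih hdrop, List.count_cons_of_ne hv, hct]

theorem analyze_eq (corrections : List (List (String × String))) :
    analyze_correction_distribution_py corrections
      = analyze_correction_distribution_py_alt corrections := by
  have haxis : axisA = axisB := rfl
  have hc : ∀ v, runLenB (rleB (PySem.List.sorted (corrections.map axisB) (fun s => s) false)) v
      = ((corrections.map axisB).count v : Int) := by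
    intro v
    rw [rle_runLen _ (PySem.List.sorted_pairwise _ _) v,
        (PySem.List.sorted_perm _ _ _).count_eq]
  simp only [analyze_correction_distribution_py, analyze_correction_distribution_py_alt, haxis]
  rw [hc "roll", hc "pitch", hc "yaw"]
  split_ifs with hnil
  · subst hnil
    simp
  · rfl

-- ===== VERDICT (by name: the statement is the Claim_ definition above) =====
theorem analyze_correction_distribution_py_spec : Claim_equal_analyze_correction_distribution_py := by
  intro corrections _ _
  unfold Spec_analyze_correction_distribution_py
  exact analyze_eq corrections
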